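-- pv_equiv track=rewrite | github.com/canonical/mephala | mephala/core/utils/patch_checks.py | is_patch_well_formed
-- ===== SOURCE A (Python) =====
-- def is_patch_well_formed(text: str) -> bool:
--     """
--     Very tolerant check:
--
--     • there must be at least one pair of   --- a/…  +++ b/…
--     • every '--- ' line must have a matching '+++' within the next
--       15 lines (covers multi-file patches)
--     • at least one @@ marker inside the patch
--
--     Good enough to reject obviously corrupt fragments while never
--     complaining about a normal git-format patch.
--     """
--     lines = text.splitlines()
--     hdr_idx: list[int] = [i for i, ln in enumerate(lines) if ln.startswith("--- ")]
--     if not hdr_idx: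
--         return False
--     if len([ln for ln in lines if ln.startswith("+++ ")]) != len(hdr_idx):
--         return False
--
--     for i in hdr_idx:
--         if not any(ln.startswith("+++ ") for ln in lines[i + 1 : i + 16]):
--             return False
--
--     return "@@" in text
-- ===== SOURCE B (Python) =====
-- def is_patch_well_formed(text: str) -> bool:
--     minus_count = 0
--     plus_count = 0
--     pending: list[int] = []
--     for i, ln in enumerate(text.splitlines()):
--         if ln.startswith("--- "):
--             minus_count += 1
--             pending.append(i)
--         elif ln.startswith("+++ "):
--             plus_count += 1
--             pending = [h for h in pending if not (h + 1 <= i <= h + 15)]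
--     return (
--         minus_count > 0
--         and minus_count == plus_count
--         and not pending
--         and "@@" in text
--     )
-- ===== Notes on version B (the rewrite author's own statement) =====
-- stated objective: alternative
-- what changed: A makes separate passes over the lines (a header-index comprehension, a plus-header count pass, then a fresh 15-line window scan for each minus-header); B is one forward loop over the enumerated lines that carries the minus/plus counts and a pending list of still-unmatched minus-header indices, dropping a pending header h when a plus-header arrives at a line index between h+1 and h+15.
import Mathlib
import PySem

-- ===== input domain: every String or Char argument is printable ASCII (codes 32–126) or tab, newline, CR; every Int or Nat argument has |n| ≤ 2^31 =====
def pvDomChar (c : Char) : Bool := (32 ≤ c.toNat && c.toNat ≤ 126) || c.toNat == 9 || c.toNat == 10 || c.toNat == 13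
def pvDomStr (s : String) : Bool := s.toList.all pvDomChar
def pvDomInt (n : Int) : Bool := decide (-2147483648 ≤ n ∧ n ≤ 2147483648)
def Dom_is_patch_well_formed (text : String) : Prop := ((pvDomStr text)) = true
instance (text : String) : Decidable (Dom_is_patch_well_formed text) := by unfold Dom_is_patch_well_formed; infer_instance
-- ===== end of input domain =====

-- B replaces A's separate passes (header-index comprehension, '+++' count pass, per-header
-- window re-scan) by ONE forward loop over enumerate(splitlines) carrying both counts and a
-- pending-headers list (objective: alternative decomposition; same return value).

-- the two line tests both programs perform: ln.startswith("--- ") / ln.startswith("+++ ")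
def pvHdr (ln : String) : Bool := PySem.Str.startswith ln "--- "
def pvPls (ln : String) : Bool := PySem.Str.startswith ln "+++ "

-- ===== PORT A =====
def is_patch_well_formed (text : String) : Bool :=
  let lines := PySem.Str.splitlines text
  let hdrIdx : List Int := ((PySem.List.enumerate lines 0).filter (fun p => pvHdr p.2)).map (·.1)
  if hdrIdx = [] then false
  else if ((lines.filter pvPls).length : Int) ≠ (hdrIdx.length : Int) then false
  else if hdrIdx.all
      (fun i => (PySem.List.slice lines (some (i+1)) (some (i+16))).any pvPls) then
    PySem.Str.isIn "@@" text
  else false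

-- ===== PORT B =====
-- one step of B's single forward loop: state = (minus_count, plus_count, pending)
def pvAltStep (st : Int × Int × List Int) (p : Int × String) : Int × Int × List Int :=
  if pvHdr p.2 then (st.1 + 1, st.2.1, st.2.2 ++ [p.1])
  else if pvPls p.2 then
    (st.1, st.2.1 + 1, st.2.2.filter (fun h => !(decide (h + 1 ≤ p.1 ∧ p.1 ≤ h + 15))))
  else st

def is_patch_well_formed_alt (text : String) : Bool :=
  let r := (PySem.List.enumerate (PySem.Str.splitlines text) 0).foldl pvAltStep (0, 0, [])
  decide (0 < r.1) && decide (r.1 = r.2.1) && decide (r.2.2 = []) && PySem.Str.isIn "@@" text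

-- ===== PRECONDITION & SPEC =====
def Spec_is_patch_well_formed (text : String) (out : Bool) : Prop := out = is_patch_well_formed_alt text
instance (text : String) (out : Bool) : Decidable (Spec_is_patch_well_formed text out) := by unfold Spec_is_patch_well_formed; infer_instance

-- ===== CLAIM (what is proved, stated in full; the proofs are below) =====
def Claim_equal_is_patch_well_formed : Prop := ∀ (text : String), Dom_is_patch_well_formed text → Spec_is_patch_well_formed text (is_patch_well_formed text)

-- ===== LEMMAS AND PROOFS =====

-- proof-only abbreviations: the '+++'-in-the-next-15-lines window test, A's header-index
-- list, and the still-unmatched header indices after scanning all of L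
def pvWin (L : List String) (i : Int) : Bool :=
  (PySem.List.slice L (some (i+1)) (some (i+16))).any pvPls
def pvHdrIdx (L : List String) : List Int :=
  ((PySem.List.enumerate L 0).filter (fun p => pvHdr p.2)).map (·.1)
def pvPending (L : List String) : List Int :=
  (pvHdrIdx L).filter (fun i => !(pvWin L i))

lemma pvHdr_not_pls (s : String) (h : pvHdr s = true) : pvPls s = false := by
  rw [Bool.eq_false_iff]
  intro hp
  unfold pvHdr at h; unfold pvPls at hp
  rw [PySem.Str.startswith_eq, PySem.Chars.startswith_iff] at h hp
  obtain ⟨t1, h1⟩ := h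
  obtain ⟨t2, h2⟩ := hp
  rw [← h1, show "--- ".toList = ['-','-','-',' '] from rfl,
      show "+++ ".toList = ['+','+','+',' '] from rfl] at h2
  simp at h2

lemma pvHdrIdx_bounds (L : List String) : ∀ i ∈ pvHdrIdx L, 0 ≤ i ∧ i < (L.length : Int) := by
  intro i hi
  unfold pvHdrIdx at hi
  obtain ⟨p, hp, rfl⟩ := List.mem_map.1 hi
  obtain ⟨hpe, _⟩ := List.mem_filter.1 hp
  obtain ⟨k, hk, rfl⟩ := (PySem.List.mem_enumerate_iff _ _ _).1 hpe
  simp; omega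

lemma pvWin_ge_length (L : List String) (i : Int) (h : (L.length : Int) ≤ i) :
    pvWin L i = false := by
  unfold pvWin
  rw [PySem.List.slice_toNat _ (by omega) (by omega),
      List.drop_eq_nil_of_le (by omega)]
  simp

-- appending one line to L adds it to the window of exactly the headers h with h+1 ≤ |L| ≤ h+15
lemma pvWin_append (L : List String) (x : String) (i : Int) (h0 : 0 ≤ i) :
    pvWin (L ++ [x]) i =
      (pvWin L i ||
        (decide (i + 1 ≤ (L.length : Int) ∧ (L.length : Int) ≤ i + 15) && pvPls x)) := by
  unfold pvWin
  rw [PySem.List.slice_toNat _ (by omega) (by omega),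
      PySem.List.slice_toNat _ (by omega) (by omega)]
  have h15 : (i+16).toNat - (i+1).toNat = 15 := by omega
  rw [h15]
  set k := (i+1).toNat with hk
  by_cases hle : k ≤ L.length
  · rw [List.drop_append_of_le_length hle]
    by_cases h15le : 15 ≤ (L.drop k).length
    · have hd : decide (i + 1 ≤ (L.length : Int) ∧ (L.length : Int) ≤ i + 15) = false := by
        rw [decide_eq_false_iff_not]
        rw [List.length_drop] at h15le
        omega
      rw [List.take_append_of_le_length h15le, hd, Bool.false_and, Bool.or_false]
    · have hlen : (L.drop k).length < 15 := by omega
      have hd : decide (i + 1 ≤ (L.length : Int) ∧ (L.length : Int) ≤ i + 15) = true := by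
        rw [decide_eq_true_eq]
        rw [List.length_drop] at hlen
        omega
      have ht : List.take (15 - (L.drop k).length) [x] = [x] :=
        List.take_of_length_le (by simp only [List.length_cons, List.length_nil]; omega)
      rw [List.take_append, ht, List.take_of_length_le (le_of_lt hlen),
          List.any_append, hd, Bool.true_and]
      simp
  · rw [List.drop_eq_nil_of_le (by simp only [List.length_append, List.length_cons, List.length_nil]; omega),
        List.drop_eq_nil_of_le (by omega)]
    have hd : decide (i + 1 ≤ (L.length : Int) ∧ (L.length : Int) ≤ i + 15) = false := by
      rw [decide_eq_false_iff_not]; omega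
    rw [hd, Bool.false_and, Bool.or_false]

lemma pvHdrIdx_append (L : List String) (x : String) :
    pvHdrIdx (L ++ [x]) = pvHdrIdx L ++ (if pvHdr x then [(L.length : Int)] else []) := by
  unfold pvHdrIdx
  rw [PySem.List.enumerate_append, List.filter_append, List.map_append]
  congr 1
  by_cases hh : pvHdr x = true
  · simp [PySem.List.enumerate, hh]
  · rw [Bool.not_eq_true] at hh
    simp [PySem.List.enumerate, hh]

-- how the pending-headers set evolves when one more line is scanned
lemma pvPending_append (L : List String) (x : String) :
    pvPending (L ++ [x]) =
      if pvHdr x then pvPending L ++ [(L.length : Int)]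
      else if pvPls x then
        (pvPending L).filter (fun h => !(decide (h + 1 ≤ (L.length : Int) ∧ (L.length : Int) ≤ h + 15)))
      else pvPending L := by
  unfold pvPending
  rw [pvHdrIdx_append, List.filter_append]
  by_cases hh : pvHdr x = true
  · have hpx : pvPls x = false := pvHdr_not_pls x hh
    rw [hh]
    simp only [if_true]
    congr 1
    · apply List.filter_congr
      intro i hi
      have hb := pvHdrIdx_bounds L i hi
      rw [pvWin_append L x i hb.1, hpx, Bool.and_false, Bool.or_false]
    · simp only [List.filter_cons, List.filter_nil]
      rw [pvWin_append L x _ (by positivity), pvWin_ge_length L _ (le_refl _)]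
      simp
  · rw [Bool.not_eq_true] at hh
    rw [hh]
    simp only [if_false, List.filter_nil, List.append_nil, Bool.false_eq_true]
    by_cases hp : pvPls x = true
    · rw [hp, if_pos rfl]
      rw [List.filter_filter]
      apply List.filter_congr
      intro i hi
      have hb := pvHdrIdx_bounds L i hi
      rw [pvWin_append L x i hb.1, hp, Bool.and_true]
      cases hw : pvWin L i <;>
        cases hc : decide (i + 1 ≤ (L.length : Int) ∧ (L.length : Int) ≤ i + 15) <;>
          simp
    · rw [Bool.not_eq_true] at hp
      rw [hp]
      simp only [Bool.false_eq_true, if_false]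
      apply List.filter_congr
      intro i hi
      have hb := pvHdrIdx_bounds L i hi
      rw [pvWin_append L x i hb.1, hp, Bool.and_false, Bool.or_false]

-- characterisation of B's single loop: the final state is the two prefix counts plus pvPending
lemma pvFoldChar (L : List String) :
    (PySem.List.enumerate L 0).foldl pvAltStep (0, 0, []) =
      (((L.filter pvHdr).length : Int), ((L.filter pvPls).length : Int), pvPending L) := by
  induction L using List.reverseRecOn with
  | nil => simp [PySem.List.enumerate, pvPending, pvHdrIdx]
  | append_singleton L x ih =>
    rw [PySem.List.enumerate_append, List.foldl_append, ih]
    have hstep : PySem.List.enumerate [x] (0 + (L.length : Int)) = [((L.length : Int), x)] := by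
      simp [PySem.List.enumerate]
    rw [hstep, List.foldl_cons, List.foldl_nil, pvPending_append,
        List.filter_append, List.filter_append]
    unfold pvAltStep
    by_cases hh : pvHdr x = true
    · have hpx : pvPls x = false := pvHdr_not_pls x hh
      simp [hh, hpx]
    · rw [Bool.not_eq_true] at hh
      by_cases hp : pvPls x = true
      · simp [hh, hp]
      · rw [Bool.not_eq_true] at hp
        simp [hh, hp]

lemma pvHdrIdx_length (L : List String) : (pvHdrIdx L).length = (L.filter pvHdr).length := by
  unfold pvHdrIdx
  rw [List.length_map,
      show L.filter pvHdr
        = ((PySem.List.enumerate L 0).map (·.2)).filter pvHdr from by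
          rw [PySem.List.map_snd_enumerate],
      List.filter_map, List.length_map]
  rfl

lemma pvPending_eq_nil_iff (L : List String) :
    (pvPending L = []) ↔ ((pvHdrIdx L).all (fun i => pvWin L i) = true) := by
  unfold pvPending
  rw [List.filter_eq_nil_iff, List.all_eq_true]
  constructor
  · intro h i hi
    have := h i hi; simpa using this
  · intro h i hi
    simp [h i hi]

-- A's checks, re-expressed against the characterised final state of B's loop
lemma pvMain (L : List String) (g : Bool) :
    (let hdrIdx : List Int := ((PySem.List.enumerate L 0).filter (fun p => pvHdr p.2)).map (·.1)
     if hdrIdx = [] then false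
     else if ((L.filter pvPls).length : Int) ≠ (hdrIdx.length : Int) then false
     else if hdrIdx.all
        (fun i => (PySem.List.slice L (some (i+1)) (some (i+16))).any pvPls) then g
     else false)
    = (decide (0 < ((L.filter pvHdr).length : Int)) &&
       decide (((L.filter pvHdr).length : Int) = ((L.filter pvPls).length : Int)) &&
       decide (pvPending L = []) && g) := by
  show (if pvHdrIdx L = [] then false
     else if ((L.filter pvPls).length : Int) ≠ ((pvHdrIdx L).length : Int) then false
     else if (pvHdrIdx L).all (fun i => pvWin L i) then g
     else false) = _
  by_cases h1 : pvHdrIdx L = []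
  · have hlen : (L.filter pvHdr).length = 0 := by rw [← pvHdrIdx_length, h1]; rfl
    rw [if_pos h1, hlen]
    simp
  · rw [if_neg h1]
    have hpos : 0 < (L.filter pvHdr).length := by
      rw [← pvHdrIdx_length]
      exact List.length_pos_of_ne_nil h1
    have d1 : decide (0 < ((L.filter pvHdr).length : Int)) = true := by
      rw [decide_eq_true_eq]; exact_mod_cast hpos
    by_cases h2 : ((L.filter pvPls).length : Int) = ((pvHdrIdx L).length : Int)
    · rw [if_neg (by simpa using h2)]
      have d2 : decide (((L.filter pvHdr).length : Int) = ((L.filter pvPls).length : Int)) = true := by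
        rw [decide_eq_true_eq, ← pvHdrIdx_length]
        omega
      rw [d1, d2, Bool.true_and, Bool.true_and]
      by_cases h3 : (pvHdrIdx L).all (fun i => pvWin L i) = true
      · rw [if_pos h3, decide_eq_true ((pvPending_eq_nil_iff L).2 h3), Bool.true_and]
      · rw [if_neg (by simpa using h3)]
        have hne : ¬ (pvPending L = []) := fun hc => h3 ((pvPending_eq_nil_iff L).1 hc)
        rw [decide_eq_false hne, Bool.false_and]
    · rw [if_pos (by simpa using h2)]
      have d2 : decide (((L.filter pvHdr).length : Int) = ((L.filter pvPls).length : Int)) = false := by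
        rw [decide_eq_false_iff_not, ← pvHdrIdx_length]
        omega
      rw [d1, d2, Bool.true_and, Bool.false_and, Bool.false_and]

-- ===== VERDICT (by name: the statement is the Claim_ definition above) =====
theorem is_patch_well_formed_spec : Claim_equal_is_patch_well_formed := by
  intro text _
  show is_patch_well_formed text = is_patch_well_formed_alt text
  have h := pvMain (PySem.Str.splitlines text) (PySem.Str.isIn "@@" text)
  unfold is_patch_well_formed is_patch_well_formed_alt
  rw [pvFoldChar]
  exact h
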